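-- pv_equiv track=rewrite | github.com/carmelolg/advent-of-code | 2021/Day3/__init__.py | inner
-- ===== SOURCE A (Python) =====
-- def inner(bits, oxygen):
--     count0 = 0
--     count1 = 0
--     start_with_0 = []
--     start_with_1 = []
--     for i, item in enumerate(bits):
--         if item == '0':
--             count0 += 1
--             start_with_0.append(i)
--         if item == '1':
--             count1 += 1
--             start_with_1.append(i)
--
--     if count0 > count1:
--         return start_with_0 if oxygen else start_with_0
--     else:
--         return start_with_1 if oxygen else start_with_0
-- ===== SOURCE B (Python) =====
-- def inner(bits, oxygen):
--     count0 = list(bits).count('0')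
--     count1 = list(bits).count('1')
--     target = '0' if (count0 > count1 or not oxygen) else '1'
--     return [i for i, c in enumerate(bits) if c == target]
-- ===== Notes on version B (the rewrite author's own statement) =====
-- stated objective: simpler
-- what changed: Counts '0'/'1' occurrences first, derives the single target character (folding in the dead oxygen branch), and collects only the one needed index list in a single comprehension instead of building both index lists and both counters in one stateful loop.
import Mathlib
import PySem

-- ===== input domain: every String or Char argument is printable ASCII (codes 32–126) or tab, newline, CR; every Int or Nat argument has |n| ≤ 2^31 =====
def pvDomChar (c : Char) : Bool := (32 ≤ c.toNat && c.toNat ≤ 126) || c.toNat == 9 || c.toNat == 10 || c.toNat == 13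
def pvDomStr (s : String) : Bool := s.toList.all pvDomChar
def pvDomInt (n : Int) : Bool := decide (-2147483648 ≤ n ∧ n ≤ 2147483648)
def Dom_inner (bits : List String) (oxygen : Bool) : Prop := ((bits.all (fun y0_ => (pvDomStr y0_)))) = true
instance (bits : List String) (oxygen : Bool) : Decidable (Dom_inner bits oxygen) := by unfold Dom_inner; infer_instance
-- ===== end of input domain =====

-- B counts '0'/'1' first, derives the single target character (dead oxygen branch folded in) and
-- collects only the one needed index list in a single comprehension: simpler decomposition, same cost.

-- ===== PORT A =====
def inner (bits : List String) (oxygen : Bool) : List Int :=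
  let r := (PySem.List.enumerate bits).foldl
    (fun (s : Int × Int × List Int × List Int) (p : Int × String) =>
      let s := if p.2 = "0" then (s.1 + 1, s.2.1, s.2.2.1 ++ [p.1], s.2.2.2) else s
      if p.2 = "1" then (s.1, s.2.1 + 1, s.2.2.1, s.2.2.2 ++ [p.1]) else s)
    ((0 : Int), (0 : Int), ([] : List Int), ([] : List Int))
  if r.1 > r.2.1 then (if oxygen then r.2.2.1 else r.2.2.1)
  else (if oxygen then r.2.2.2 else r.2.2.1)

-- ===== PORT B =====
def inner_alt (bits : List String) (oxygen : Bool) : List Int :=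
  let count0 : Int := (PySem.List.count bits "0" : Int)
  let count1 : Int := (PySem.List.count bits "1" : Int)
  let target := if count0 > count1 ∨ oxygen = false then "0" else "1"
  (PySem.List.enumerate bits).foldl
    (fun (acc : List Int) (p : Int × String) => if p.2 = target then acc ++ [p.1] else acc) []

-- ===== PRECONDITION & SPEC =====
def Spec_inner (bits : List String) (oxygen : Bool) (out : List Int) : Prop := out = inner_alt bits oxygen
instance (bits : List String) (oxygen : Bool) (out : List Int) : Decidable (Spec_inner bits oxygen out) := by unfold Spec_inner; infer_instance

-- ===== CLAIM (what is proved, stated in full; the proofs are below) =====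
def Claim_equal_inner : Prop := ∀ (bits : List String) (oxygen : Bool), Dom_inner bits oxygen → Spec_inner bits oxygen (inner bits oxygen)

-- ===== LEMMAS AND PROOFS =====

-- reference "indices of elements equal to t, counting from s"
def pvSel (bits : List String) (s : Int) (t : String) : List Int :=
  match bits with
  | [] => []
  | b :: bs => (if b = t then [s] else []) ++ pvSel bs (s + 1) t

theorem pvB_loop (bits : List String) (t : String) (s : Int) (acc : List Int) :
    (PySem.List.enumerate bits s).foldl
      (fun (acc : List Int) (p : Int × String) => if p.2 = t then acc ++ [p.1] else acc) acc
    = acc ++ pvSel bits s t := by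
  induction bits generalizing s acc with
  | nil => simp [PySem.List.enumerate_nil, pvSel]
  | cons b bs ih =>
    simp only [PySem.List.enumerate_cons, List.foldl_cons, pvSel, ih]
    by_cases h : b = t <;> simp [h]

theorem pvA_loop (bits : List String) (s : Int) (c0 c1 : Int) (l0 l1 : List Int) :
    (PySem.List.enumerate bits s).foldl
      (fun (st : Int × Int × List Int × List Int) (p : Int × String) =>
        let st := if p.2 = "0" then (st.1 + 1, st.2.1, st.2.2.1 ++ [p.1], st.2.2.2) else st
        if p.2 = "1" then (st.1, st.2.1 + 1, st.2.2.1, st.2.2.2 ++ [p.1]) else st)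
      (c0, c1, l0, l1)
    = (c0 + (PySem.List.count bits "0" : Int), c1 + (PySem.List.count bits "1" : Int),
       l0 ++ pvSel bits s "0", l1 ++ pvSel bits s "1") := by
  induction bits generalizing s c0 c1 l0 l1 with
  | nil => simp [PySem.List.enumerate_nil, pvSel, PySem.List.count]
  | cons b bs ih =>
    simp only [PySem.List.enumerate_cons, List.foldl_cons, pvSel, PySem.List.count,
      List.count_cons]
    by_cases h0 : b = "0"
    · have h1 : ¬ b = "1" := by simp [h0]
      simp [h0, ih]
      ring
    · by_cases h1 : b = "1"
      · simp [h1, ih]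
        ring
      · simp [h0, h1, ih]

-- ===== VERDICT (by name: the statement is the Claim_ definition above) =====
theorem inner_spec : Claim_equal_inner := by
  intro bits oxygen _
  show inner bits oxygen = inner_alt bits oxygen
  unfold _root_.inner inner_alt
  simp only [pvA_loop, pvB_loop, List.nil_append, zero_add]
  by_cases hc : List.count "1" bits < List.count "0" bits <;>
    cases oxygen <;> simp [hc]
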